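-- pv_equiv track=rewrite | github.com/Aurora-TF/Algorithm | week9 - sort/koo/2_pro_172927.py | solution
-- ===== SOURCE A (Python) =====
-- def solution(picks, minerals):
--     answer = 0
--     total = sum(picks)
--
--     possible = total * 5
--     if len(minerals) > possible:
--         minerals = minerals[:possible]
--
--     new_minerals = [[0, 0, 0] for _ in range(len(minerals) // 5 + 1)]
--     for m in range(len(minerals)):
--         if minerals[m] == 'diamond':
--             new_minerals[m // 5][0] += 1
--         elif minerals[m] == 'iron':
--             new_minerals[m // 5][1] += 1
--         elif minerals[m] == 'stone':
--             new_minerals[m // 5][2] += 1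
--
--     new_minerals.sort(key = lambda x : (x[0], x[1], x[2]), reverse = True)
--
--     for i in new_minerals:
--         dia, iron, stone = i
--
--         for j in range(len(picks)):
--             if picks[j] > 0 and j == 0:
--                 picks[j] -= 1
--                 answer += dia + iron + stone
--                 break
--             elif picks[j] > 0 and j == 1:
--                 picks[j] -= 1
--                 answer += dia * 5 + iron + stone
--                 break
--             elif picks[j] > 0 and j == 2:
--                 picks[j] -= 1
--                 answer += dia * 25 + iron * 5 + stone
--                 break
--
--     return answer
-- ===== SOURCE B (Python) =====
-- def solution(picks, minerals):
--     # NOTE: unlike the original, this version does not mutate `picks`;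
--     # the equivalence claimed is about the return value only.
--     minerals = minerals[: sum(picks) * 5]
--     # one streaming pass: histogram of chunk signatures (dia, iron, stone)
--     hist = {}
--     d = i = s = 0
--     for k in range(len(minerals)):
--         m = minerals[k]
--         if m == 'diamond':
--             d += 1
--         elif m == 'iron':
--             i += 1
--         elif m == 'stone':
--             s += 1
--         if k % 5 == 4:
--             hist[(d, i, s)] = hist.get((d, i, s), 0) + 1
--             d = i = s = 0
--     if len(minerals) % 5 != 0:
--         hist[(d, i, s)] = hist.get((d, i, s), 0) + 1
--     # tier capacities (at most three tiers matter)
--     caps = (list(picks) + [0, 0, 0])[:3]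
--     c0, c1, c2 = (max(caps[0], 0), max(caps[1], 0), max(caps[2], 0))
--     # enumerate every possible signature in descending order (counting sort:
--     # no comparison sort of chunks) and hand each count out arithmetically
--     answer = 0
--     for dd in range(5, -1, -1):
--         for ii in range(5 - dd, -1, -1):
--             for ss in range(5 - dd - ii, -1, -1):
--                 cnt = hist.get((dd, ii, ss), 0)
--                 t0 = min(cnt, c0); cnt -= t0; c0 -= t0
--                 t1 = min(cnt, c1); cnt -= t1; c1 -= t1
--                 t2 = min(cnt, c2); c2 -= t2
--                 answer += (t0 + 5 * t1 + 25 * t2) * dd \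
--                     + (t0 + t1 + 5 * t2) * ii + (t0 + t1 + t2) * ss
--     return answer
-- ===== Notes on version B (the rewrite author's own statement) =====
-- stated objective: alternative
-- what changed: B replaces A's materialized chunk list, comparison sort and per-chunk inner scan over picks (with in-place decrements and break) by a single streaming pass that flushes every 5th mineral into a histogram keyed by chunk signature, a fixed descending enumeration of all 56 possible signatures (a counting sort, no comparison sort), and an arithmetic batch distribution of each signature's count over the three pick tiers; B does not mutate picks (A's only other effect is the in-place decrement of picks, so the equivalence is about the return value).
import Mathlib
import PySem

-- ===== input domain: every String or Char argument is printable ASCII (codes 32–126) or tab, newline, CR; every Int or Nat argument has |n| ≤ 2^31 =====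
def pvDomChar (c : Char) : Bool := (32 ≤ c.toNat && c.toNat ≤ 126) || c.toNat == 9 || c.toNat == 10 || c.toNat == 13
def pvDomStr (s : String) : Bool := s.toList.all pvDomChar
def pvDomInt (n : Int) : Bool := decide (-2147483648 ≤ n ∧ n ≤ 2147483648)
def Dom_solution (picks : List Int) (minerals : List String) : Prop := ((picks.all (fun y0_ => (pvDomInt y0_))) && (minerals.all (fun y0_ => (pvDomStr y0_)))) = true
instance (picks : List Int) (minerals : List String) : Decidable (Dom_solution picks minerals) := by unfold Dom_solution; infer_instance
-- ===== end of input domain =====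

-- B replaces A's chunk-list building, comparison sort and per-chunk pick scan by a one-pass
-- histogram of chunk signatures, a fixed descending enumeration of all 56 possible signatures
-- (a counting sort: no comparison sort) and an arithmetic batch hand-out of each count across
-- the three pick tiers, dropping A's per-chunk inner scan over picks (objective: alternative).
-- Unlike A, B does not mutate `picks` in place; the equivalence proved here is about the
-- return value only.

-- ===== PORT A =====
-- inner `for j in range(len(picks))` loop with break; picks[j] is read/written only at
-- indices 0 ≤ j < len(picks), so pyGetD / List.set are exact here.
def pvInnerA (picks : List Int) (ans d i s : Int) : List Int → List Int × Int
  | [] => (picks, ans)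
  | j :: rest =>
    if PySem.List.pyGetD picks j 0 > 0 ∧ j = 0 then
      (picks.set j.toNat (PySem.List.pyGetD picks j 0 - 1), ans + (d + i + s))
    else if PySem.List.pyGetD picks j 0 > 0 ∧ j = 1 then
      (picks.set j.toNat (PySem.List.pyGetD picks j 0 - 1), ans + (d * 5 + i + s))
    else if PySem.List.pyGetD picks j 0 > 0 ∧ j = 2 then
      (picks.set j.toNat (PySem.List.pyGetD picks j 0 - 1), ans + (d * 25 + i * 5 + s))
    else
      pvInnerA picks ans d i s rest

def solution (picks : List Int) (minerals : List String) : Int :=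
  let answer : Int := 0
  let total := picks.sum
  let possible := total * 5
  let minerals :=
    if (minerals.length : Int) > possible then PySem.List.slice minerals none (some possible)
    else minerals
  -- new_minerals[m//5][x] += 1 : in-place update of the (m//5)-th triple; m ≥ 0, so
  -- (floordiv m 5).toNat is exact.
  let newMinerals :=
    (PySem.List.pyRange 0 (minerals.length : Int) 1).foldl
      (fun acc m =>
        let v := PySem.List.pyGetD minerals m ""
        if v = "diamond" then acc.modify (PySem.Int.floordiv m 5).toNat (fun c => (c.1 + 1, c.2.1, c.2.2))
        else if v = "iron" then acc.modify (PySem.Int.floordiv m 5).toNat (fun c => (c.1, c.2.1 + 1, c.2.2))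
        else if v = "stone" then acc.modify (PySem.Int.floordiv m 5).toNat (fun c => (c.1, c.2.1, c.2.2 + 1))
        else acc)
      (List.replicate (minerals.length / 5 + 1) ((0 : Int), (0 : Int), (0 : Int)))
  -- sort key (x[0], x[1], x[2]) reverse=True: every component lies in [0, 5], so the scalar
  -- key 36*x0 + 6*x1 + x2 orders these triples exactly like Python's tuple key (same stability).
  let newMinerals := PySem.List.sorted newMinerals (fun c => c.1 * 36 + c.2.1 * 6 + c.2.2) true
  let st :=
    newMinerals.foldl
      (fun (st : List Int × Int) c =>
        pvInnerA st.1 st.2 c.1 c.2.1 c.2.2 (PySem.List.pyRange 0 (st.1.length : Int) 1))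
      (picks, answer)
  st.2

-- ===== PORT B =====
-- the body of B's single streaming pass: update the running (dia, iron, stone) counters with
-- mineral p.2 and, at every index p.1 ≡ 4 (mod 5), flush them into the histogram
def pvStepB (st : Int × Int × Int × PySem.Dict (Int × Int × Int) Int) (p : Int × String) :
    Int × Int × Int × PySem.Dict (Int × Int × Int) Int :=
  let d := st.1
  let i := st.2.1
  let s := st.2.2.1
  let h := st.2.2.2
  let dis :=
    if p.2 = "diamond" then (d + 1, i, s)
    else if p.2 = "iron" then (d, i + 1, s)
    else if p.2 = "stone" then (d, i, s + 1)
    else (d, i, s)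
  if PySem.Int.mod p.1 5 = 4 then
    (0, 0, 0, h.insert dis (h.getD dis 0 + 1))
  else (dis.1, dis.2.1, dis.2.2, h)

-- the body of B's innermost loop: hand the cnt chunks of signature g out to the three tiers;
-- state is (answer, c0, c1, c2)
def pvBStep (st : Int × Int × Int × Int) (cnt : Int) (g : Int × Int × Int) :
    Int × Int × Int × Int :=
  let t0 := min cnt st.2.1
  let cnt1 := cnt - t0
  let c0 := st.2.1 - t0
  let t1 := min cnt1 st.2.2.1
  let cnt2 := cnt1 - t1
  let c1 := st.2.2.1 - t1
  let t2 := min cnt2 st.2.2.2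
  let c2 := st.2.2.2 - t2
  (st.1 + ((t0 + 5 * t1 + 25 * t2) * g.1 + (t0 + t1 + 5 * t2) * g.2.1 + (t0 + t1 + t2) * g.2.2),
   c0, c1, c2)

def solution_alt (picks : List Int) (minerals : List String) : Int :=
  let ms := PySem.List.slice minerals none (some (picks.sum * 5))
  let st :=
    (PySem.List.pyRange 0 (ms.length : Int) 1).foldl
      (fun st k => pvStepB st (k, PySem.List.pyGetD ms k ""))
      ((0 : Int), (0 : Int), (0 : Int), (PySem.Dict.empty : PySem.Dict (Int × Int × Int) Int))
  let hist :=
    if PySem.Int.mod (ms.length : Int) 5 ≠ 0 then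
      st.2.2.2.insert (st.1, st.2.1, st.2.2.1) (st.2.2.2.getD (st.1, st.2.1, st.2.2.1) 0 + 1)
    else st.2.2.2
  let caps := PySem.List.slice (picks ++ [0, 0, 0]) none (some 3)
  let c0 := max (PySem.List.pyGetD caps 0 0) 0
  let c1 := max (PySem.List.pyGetD caps 1 0) 0
  let c2 := max (PySem.List.pyGetD caps 2 0) 0
  let fin :=
    (PySem.List.pyRange 5 (-1) (-1)).foldl
      (fun st dd =>
        (PySem.List.pyRange (5 - dd) (-1) (-1)).foldl
          (fun st ii =>
            (PySem.List.pyRange (5 - dd - ii) (-1) (-1)).foldl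
              (fun st ss => pvBStep st (hist.getD (dd, ii, ss) 0) (dd, ii, ss)) st) st)
      ((0 : Int), c0, c1, c2)
  fin.1

-- ===== PRECONDITION & SPEC =====
def Spec_solution (picks : List Int) (minerals : List String) (out : Int) : Prop := out = solution_alt picks minerals
instance (picks : List Int) (minerals : List String) (out : Int) : Decidable (Spec_solution picks minerals out) := by unfold Spec_solution; infer_instance

-- ===== CLAIM (what is proved, stated in full; the proofs are below) =====
def Claim_equal_solution : Prop := ∀ (picks : List Int) (minerals : List String), Dom_solution picks minerals → Spec_solution picks minerals (solution picks minerals)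

-- ===== LEMMAS AND PROOFS =====

-- the 56 possible chunk signatures (d, i, s) with d, i, s ≥ 0 and d + i + s ≤ 5, in the order
-- B's three nested ranges enumerate them (descending lexicographic)
def pvDescSigs : List (Int × Int × Int) := [(5, 0, 0), (4, 1, 0), (4, 0, 1), (4, 0, 0), (3, 2, 0), (3, 1, 1), (3, 1, 0), (3, 0, 2), (3, 0, 1), (3, 0, 0), (2, 3, 0), (2, 2, 1), (2, 2, 0), (2, 1, 2), (2, 1, 1), (2, 1, 0), (2, 0, 3), (2, 0, 2), (2, 0, 1), (2, 0, 0), (1, 4, 0), (1, 3, 1), (1, 3, 0), (1, 2, 2), (1, 2, 1), (1, 2, 0), (1, 1, 3), (1, 1, 2), (1, 1, 1), (1, 1, 0), (1, 0, 4), (1, 0, 3), (1, 0, 2), (1, 0, 1), (1, 0, 0), (0, 5, 0), (0, 4, 1), (0, 4, 0), (0, 3, 2), (0, 3, 1), (0, 3, 0), (0, 2, 3), (0, 2, 2), (0, 2, 1), (0, 2, 0), (0, 1, 4), (0, 1, 3), (0, 1, 2), (0, 1, 1), (0, 1, 0), (0, 0, 5), (0, 0, 4), (0, 0, 3), (0,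 0, 2), (0, 0, 1), (0, 0, 0)]

def pvKey (g : Int × Int × Int) : Int := g.1 * 36 + g.2.1 * 6 + g.2.2


-- ---- A-side characterisation (chunk build, sort, greedy inner loop) ----

-- A's conditional truncation equals B's unconditional slice.
theorem pvTrunc (ms : List String) (p : Int) :
    (if (ms.length : Int) > p then PySem.List.slice ms none (some p) else ms)
      = PySem.List.slice ms none (some p) := by
  split
  · rfl
  · next h =>
    rw [PySem.List.slice_to ms (by omega : (0:Int) ≤ p), List.take_of_length_le (by omega)]

-- the weight functions of the three pick tiers
def pvW0 (c : Int × Int × Int) : Int := c.1 + c.2.1 + c.2.2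
def pvW1 (c : Int × Int × Int) : Int := c.1 * 5 + c.2.1 + c.2.2
def pvW2 (c : Int × Int × Int) : Int := c.1 * 25 + c.2.1 * 5 + c.2.2

-- what A's greedy loop pays, as a recursion on the chunk list
def pvPay (p0 p1 p2 : Int) : List (Int × Int × Int) → Int
  | [] => 0
  | c :: t =>
    if p0 > 0 then pvW0 c + pvPay (p0 - 1) p1 p2 t
    else if p1 > 0 then pvW1 c + pvPay p0 (p1 - 1) p2 t
    else if p2 > 0 then pvW2 c + pvPay p0 p1 (p2 - 1) t
    else 0

theorem pvInnerA_noop (p : List Int) (ans d i s : Int) (js : List Int)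
    (h : ∀ j ∈ js, ¬(j = 0 ∨ j = 1 ∨ j = 2)) :
    pvInnerA p ans d i s js = (p, ans) := by
  induction js with
  | nil => rfl
  | cons j rest ih =>
    have hj := h j (List.mem_cons_self ..)
    rw [pvInnerA, if_neg (by tauto), if_neg (by tauto), if_neg (by tauto)]
    exact ih (fun x hx => h x (List.mem_cons_of_mem _ hx))

theorem pvInnerA_spec (p : List Int) (ans d i s : Int) :
    pvInnerA p ans d i s (PySem.List.pyRange 0 (p.length : Int) 1)
      = if p.getD 0 0 > 0 then (p.set 0 (p.getD 0 0 - 1), ans + (d + i + s))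
        else if p.getD 1 0 > 0 then (p.set 1 (p.getD 1 0 - 1), ans + (d * 5 + i + s))
        else if p.getD 2 0 > 0 then (p.set 2 (p.getD 2 0 - 1), ans + (d * 25 + i * 5 + s))
        else (p, ans) := by
  match p with
  | [] =>
    have hr : PySem.List.pyRange 0 ((([] : List Int).length : Nat) : Int) 1 = [] := by decide
    rw [hr]
    simp [pvInnerA, List.getD]
  | [a] =>
    have hr : PySem.List.pyRange 0 ((([a] : List Int).length : Nat) : Int) 1 = [0] := by
      simp [PySem.List.pyRange_one, List.range_succ]
    rw [hr]
    by_cases ha : a > 0 <;>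
      simp [pvInnerA, PySem.List.pyGetD_ofNat', List.getD, ha, List.set]
  | [a, b] =>
    have hr : PySem.List.pyRange 0 ((([a, b] : List Int).length : Nat) : Int) 1 = [0, 1] := by
      simp [PySem.List.pyRange_one, List.range_succ]
    rw [hr]
    by_cases ha : a > 0 <;> by_cases hb : b > 0 <;>
      simp [pvInnerA, PySem.List.pyGetD_ofNat', List.getD, ha, hb, List.set]
  | [a, b, c] =>
    have hr : PySem.List.pyRange 0 ((([a, b, c] : List Int).length : Nat) : Int) 1 = [0, 1, 2] := by
      simp [PySem.List.pyRange_one, List.range_succ]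
    rw [hr]
    by_cases ha : a > 0 <;> by_cases hb : b > 0 <;> by_cases hc : c > 0 <;>
      simp [pvInnerA, PySem.List.pyGetD_ofNat', List.getD, ha, hb, hc, List.set]
  | x :: y :: z :: w :: rest =>
    have hn : (((x :: y :: z :: w :: rest).length : Nat) : Int) = (rest.length : Int) + 4 := by
      simp; omega
    rw [hn]
    rw [PySem.List.pyRange_one_cons (by omega), PySem.List.pyRange_one_cons (by omega),
        PySem.List.pyRange_one_cons (by omega)]
    norm_num
    have hno : ∀ ans', pvInnerA (x :: y :: z :: w :: rest) ans' d i s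
        (PySem.List.pyRange 3 ((rest.length : Int) + 4) 1) = (x :: y :: z :: w :: rest, ans') := by
      intro ans'
      apply pvInnerA_noop
      intro j hj
      rw [PySem.List.mem_pyRange_one] at hj
      omega
    by_cases ha : x > 0 <;> by_cases hb : y > 0 <;> by_cases hc : z > 0 <;>
      simp [pvInnerA, PySem.List.pyGetD_ofNat', List.getD, ha, hb, hc, List.set, hno]

theorem pvGetDSet (p : List Int) (k j : Nat) (v : Int) :
    (p.set k v).getD j 0 = if k = j ∧ j < p.length then v else p.getD j 0 := by
  rcases Nat.lt_or_ge j p.length with hj | hj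
  · rcases eq_or_ne k j with rfl | hk
    · simp [List.getD_eq_getElem?_getD, List.getElem?_set, hj]
    · simp [List.getD_eq_getElem?_getD, List.getElem?_set, hk, hj]
  · have h1 : (p.set k v).getD j 0 = 0 := by
      apply List.getD_eq_default
      simpa using hj
    have h2 : p.getD j 0 = 0 := List.getD_eq_default _ _ (by omega)
    rw [h1, h2]
    simp
    omega

theorem pvPay_nonpos (p0 p1 p2 : Int) (h0 : ¬ p0 > 0) (h1 : ¬ p1 > 0) (h2 : ¬ p2 > 0)
    (cs : List (Int × Int × Int)) : pvPay p0 p1 p2 cs = 0 := by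
  cases cs <;> simp [pvPay, h0, h1, h2]

theorem pvFoldA_spec (cs : List (Int × Int × Int)) :
    ∀ (p : List Int) (ans : Int),
    (cs.foldl
      (fun (st : List Int × Int) c =>
        pvInnerA st.1 st.2 c.1 c.2.1 c.2.2 (PySem.List.pyRange 0 (st.1.length : Int) 1))
      (p, ans)).2
      = ans + pvPay (p.getD 0 0) (p.getD 1 0) (p.getD 2 0) cs := by
  induction cs with
  | nil => intro p ans; simp [pvPay]
  | cons c t ih =>
    intro p ans
    simp only [List.foldl_cons]
    rw [pvInnerA_spec]
    by_cases h0 : p.getD 0 0 > 0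
    · have hlen : 0 < p.length := by
        by_contra hl
        have h' : p.getD 0 0 = 0 := List.getD_eq_default _ _ (by omega)
        omega
      rw [if_pos h0, ih, pvPay, if_pos h0]
      simp [pvGetDSet, hlen, pvW0]
      try ring
    · by_cases h1 : p.getD 1 0 > 0
      · have hlen : 1 < p.length := by
          by_contra hl
          have h' : p.getD 1 0 = 0 := List.getD_eq_default _ _ (by omega)
          omega
        rw [if_neg h0, if_pos h1, ih, pvPay, if_neg h0, if_pos h1]
        simp [pvGetDSet, hlen, pvW1]
        try ring
      · by_cases h2 : p.getD 2 0 > 0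
        · have hlen : 2 < p.length := by
            by_contra hl
            have h' : p.getD 2 0 = 0 := List.getD_eq_default _ _ (by omega)
            omega
          rw [if_neg h0, if_neg h1, if_pos h2, ih, pvPay, if_neg h0, if_neg h1, if_pos h2]
          simp [pvGetDSet, hlen, pvW2]
          try ring
        · rw [if_neg h0, if_neg h1, if_neg h2, ih,
              pvPay_nonpos _ _ _ h0 h1 h2, pvPay_nonpos _ _ _ h0 h1 h2]

theorem pvPay_append_zero (cs : List (Int × Int × Int)) :
    ∀ (p0 p1 p2 : Int),
    pvPay p0 p1 p2 (cs ++ [((0 : Int), (0 : Int), (0 : Int))]) = pvPay p0 p1 p2 cs := by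
  induction cs with
  | nil =>
    intro p0 p1 p2
    simp only [List.nil_append]
    by_cases h0 : p0 > 0
    · simp [pvPay, h0, pvW0]
    · by_cases h1 : p1 > 0
      · simp [pvPay, h0, h1, pvW1]
      · by_cases h2 : p2 > 0
        · simp [pvPay, h0, h1, h2, pvW2]
        · simp [pvPay, h0, h1, h2]
  | cons c t ih =>
    intro p0 p1 p2
    simp only [List.cons_append]
    by_cases h0 : p0 > 0
    · simp [pvPay, h0, ih]
    · by_cases h1 : p1 > 0
      · simp [pvPay, h0, h1, ih]
      · by_cases h2 : p2 > 0
        · simp [pvPay, h0, h1, h2, ih]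
        · simp [pvPay, h0, h1, h2]

-- ---- the chunk-building fold of A: per-chunk signature counts (plus A's padding chunk) ----

def pvChunkCounts (grp : List String) : Int × Int × Int :=
  ((PySem.List.count grp "diamond" : Int), (PySem.List.count grp "iron" : Int),
   (PySem.List.count grp "stone" : Int))

def pvChunksOf (ms : List String) : List (Int × Int × Int) :=
  (PySem.List.pyRange 0 (ms.length : Int) 5).map
    (fun s => pvChunkCounts (PySem.List.slice ms (some s) (some (s + 5))))

def pvStepA (acc : List (Int × Int × Int)) (p : Int × String) :
    List (Int × Int × Int) :=
  if p.2 = "diamond" then acc.modify (PySem.Int.floordiv p.1 5).toNat (fun c => (c.1 + 1, c.2.1, c.2.2))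
  else if p.2 = "iron" then acc.modify (PySem.Int.floordiv p.1 5).toNat (fun c => (c.1, c.2.1 + 1, c.2.2))
  else if p.2 = "stone" then acc.modify (PySem.Int.floordiv p.1 5).toNat (fun c => (c.1, c.2.1, c.2.2 + 1))
  else acc

def pvPad (ms : List String) : List (Int × Int × Int) :=
  if ms.length % 5 = 0 then [((0 : Int), (0 : Int), (0 : Int))] else []

theorem pvFd0 (j : Int) (h0 : 0 ≤ j) (h5 : j < 5) : (PySem.Int.floordiv j 5).toNat = 0 := by
  simp [PySem.Int.floordiv, Int.fdiv_eq_ediv]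
  omega

theorem pvFdShift (j : Int) (h : 5 ≤ j) :
    (PySem.Int.floordiv j 5).toNat = (PySem.Int.floordiv (j - 5) 5).toNat + 1 := by
  simp [PySem.Int.floordiv, Int.fdiv_eq_ediv]
  omega

theorem pvMemEnumFirst {α : Type} (xs : List α) (s : Int) (p : Int × α)
    (h : p ∈ PySem.List.enumerate xs s) : s ≤ p.1 ∧ p.1 < s + xs.length := by
  induction xs generalizing s with
  | nil => simp [PySem.List.enumerate] at h
  | cons x t ih =>
    have hc : PySem.List.enumerate (x :: t) s = (s, x) :: PySem.List.enumerate t (s + 1) := by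
      simp [PySem.List.enumerate]
    rw [hc] at h
    rcases List.mem_cons.mp h with h | h
    · subst h
      constructor
      · simp
      · simp only [List.length_cons]
        push_cast
        omega
    · have := ih (s + 1) h
      simp only [List.length_cons]
      push_cast
      omega

theorem pvEnumShift {α : Type} (xs : List α) (s t : Int) :
    (PySem.List.enumerate xs s).map (fun p => (p.1 - t, p.2)) = PySem.List.enumerate xs (s - t) := by
  induction xs generalizing s with
  | nil => simp [PySem.List.enumerate]
  | cons x xs ih =>
    have hc : ∀ (u : Int), PySem.List.enumerate (x :: xs) u = (u, x) :: PySem.List.enumerate xs (u + 1) := by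
      intro u; simp [PySem.List.enumerate]
    rw [hc, hc, List.map_cons, ih]
    rw [show s - t + 1 = s + 1 - t from by ring]

theorem pvHeadBlock (l : List (Int × String))
    (h : ∀ p ∈ l, 0 ≤ p.1 ∧ p.1 < 5) :
    ∀ (c : Int × Int × Int) (t : List (Int × Int × Int)),
    l.foldl pvStepA (c :: t)
      = (c.1 + (List.count "diamond" (l.map Prod.snd) : Int),
         c.2.1 + (List.count "iron" (l.map Prod.snd) : Int),
         c.2.2 + (List.count "stone" (l.map Prod.snd) : Int)) :: t := by
  induction l with
  | nil => intro c t; simp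
  | cons p l' ih =>
    intro c t
    simp only [List.foldl_cons]
    have hp := h p (List.mem_cons_self ..)
    have hfd : (PySem.Int.floordiv p.1 5).toNat = 0 := pvFd0 _ hp.1 hp.2
    have hrec := ih (fun q hq => h q (List.mem_cons_of_mem _ hq))
    by_cases hd : p.2 = "diamond"
    · have hstep : pvStepA (c :: t) p = (c.1 + 1, c.2.1, c.2.2) :: t := by
        simp only [pvStepA, hd]
        rw [hfd]
        simp [List.modify_cons]
      rw [hstep, hrec]
      simp [List.count_cons, hd, Prod.ext_iff] <;> push_cast <;> omega
    · by_cases hi : p.2 = "iron"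
      · have hstep : pvStepA (c :: t) p = (c.1, c.2.1 + 1, c.2.2) :: t := by
          simp only [pvStepA, hi]
          rw [hfd]
          simp [List.modify_cons]
        rw [hstep, hrec]
        simp [List.count_cons, hd, hi, Prod.ext_iff] <;> push_cast <;> omega
      · by_cases hs : p.2 = "stone"
        · have hstep : pvStepA (c :: t) p = (c.1, c.2.1, c.2.2 + 1) :: t := by
            simp only [pvStepA, hs]
            rw [hfd]
            simp [List.modify_cons]
          rw [hstep, hrec]
          simp [List.count_cons, hd, hi, hs, Prod.ext_iff] <;> push_cast <;> omega
        · have hstep : pvStepA (c :: t) p = c :: t := by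
            simp [pvStepA, hd, hi, hs]
          rw [hstep, hrec]
          simp [List.count_cons, hd, hi, hs]

theorem pvShiftBlock (l : List (Int × String))
    (h : ∀ p ∈ l, 5 ≤ p.1) :
    ∀ (c : Int × Int × Int) (acc : List (Int × Int × Int)),
    l.foldl pvStepA (c :: acc)
      = c :: (l.map (fun p => (p.1 - 5, p.2))).foldl pvStepA acc := by
  induction l with
  | nil => intro c acc; simp
  | cons p l' ih =>
    intro c acc
    simp only [List.foldl_cons, List.map_cons]
    have hp := h p (List.mem_cons_self ..)
    have hstep : pvStepA (c :: acc) p = c :: pvStepA acc (p.1 - 5, p.2) := by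
      simp only [pvStepA]
      rw [pvFdShift _ hp]
      split_ifs <;> simp [List.modify_cons]
    rw [hstep, ih (fun q hq => h q (List.mem_cons_of_mem _ hq))]

theorem pvRange5_cons (n : Int) (h : 0 < n) :
    PySem.List.pyRange 0 n 5 = 0 :: (PySem.List.pyRange 0 (n - 5) 5).map (· + 5) := by
  rw [PySem.List.pyRange_of_pos _ _ (by norm_num : (0:Int) < 5),
      PySem.List.pyRange_of_pos _ _ (by norm_num : (0:Int) < 5)]
  by_cases h5 : n ≤ 5
  · rw [show (if (0:Int) < n then ((n - 0 + 5 - 1) / 5).toNat else 0) = 1 from by rw [if_pos h]; omega]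
    rw [show (if (0:Int) < n - 5 then ((n - 5 - 0 + 5 - 1) / 5).toNat else 0) = 0 from by
      rw [if_neg (by omega)]]
    simp [List.range_succ]
  · rw [show (if (0:Int) < n then ((n - 0 + 5 - 1) / 5).toNat else 0)
          = ((if (0:Int) < n - 5 then ((n - 5 - 0 + 5 - 1) / 5).toNat else 0)) + 1 from by
        rw [if_pos h, if_pos (by omega)]; omega]
    rw [List.range_succ_eq_map, List.map_cons, List.map_map, List.map_map]
    congr 1

theorem pvChunksOf_cons (ms : List String) (h : ms ≠ []) :
    pvChunksOf ms = pvChunkCounts (ms.take 5) :: pvChunksOf (ms.drop 5) := by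
  unfold pvChunksOf
  have hn : (0:Int) < (ms.length : Int) := by
    have := List.length_pos_iff.mpr h
    omega
  rw [pvRange5_cons _ hn, List.map_cons, List.map_map]
  congr 1
  · congr 1
    rw [show (0:Int) + 5 = 5 from by norm_num]
    simp [PySem.List.slice_to ms (by norm_num : (0:Int) ≤ 5)]
  · by_cases h5 : ms.length ≤ 5
    · have h1 : PySem.List.pyRange 0 ((ms.length : Int) - 5) 5 = [] := by
        rw [PySem.List.pyRange_of_pos _ _ (by norm_num : (0:Int) < 5), if_neg (by omega)]
        simp
      have h2 : PySem.List.pyRange 0 (((ms.drop 5).length : Nat) : Int) 5 = [] := by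
        rw [PySem.List.pyRange_of_pos _ _ (by norm_num : (0:Int) < 5),
            if_neg (by rw [List.length_drop]; omega)]
        simp
      rw [h1, h2]
      simp
    · rw [show (((ms.drop 5).length : Nat) : Int) = (ms.length : Int) - 5 from by
        rw [List.length_drop]; push_cast; omega]
      apply List.map_congr_left
      intro s hs
      have hs0 : 0 ≤ s := by
        rcases (PySem.List.mem_pyRange_iff_of_pos (by norm_num) s).mp hs with ⟨h1, _⟩
        exact h1
      simp only [Function.comp]
      congr 1
      rw [PySem.List.slice_toNat _ (by omega) (by omega), PySem.List.slice_toNat _ (by omega) (by omega)]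
      rw [List.drop_drop]
      congr 1
      · omega
      · congr 1
        omega

theorem pvEnumBuild : ∀ (n : Nat) (ms : List String), ms.length = n →
    (PySem.List.enumerate ms 0).foldl pvStepA
        (List.replicate (ms.length / 5 + 1) ((0 : Int), (0 : Int), (0 : Int)))
      = pvChunksOf ms ++ pvPad ms := by
  intro n
  induction n using Nat.strong_induction_on with
  | _ n IH =>
    intro ms hlen
    rcases Nat.eq_zero_or_pos n with hn0 | hnpos
    · subst hn0
      have hne : ms = [] := List.eq_nil_of_length_eq_zero hlen
      subst hne
      decide
    · have hne : ms ≠ [] := by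
        intro hcon
        subst hcon
        simp at hlen
        omega
      have he : PySem.List.enumerate ms 0
          = PySem.List.enumerate (ms.take 5) 0
            ++ PySem.List.enumerate (ms.drop 5) (0 + ((ms.take 5).length : Int)) := by
        conv_lhs => rw [← List.take_append_drop 5 ms]
        rw [PySem.List.enumerate_append]
      rw [he, List.foldl_append]
      have hbd : ∀ p ∈ PySem.List.enumerate (ms.take 5) 0, 0 ≤ p.1 ∧ p.1 < 5 := by
        intro p hp
        have := pvMemEnumFirst _ _ _ hp
        have hlt : (ms.take 5).length ≤ 5 := by
          rw [List.length_take]; omega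
        constructor
        · omega
        · have : p.1 < 0 + ((ms.take 5).length : Int) := this.2
          push_cast at this ⊢
          omega
      rcases Nat.lt_or_ge 5 ms.length with hgt | hle
      · -- more than one chunk
        have hlen5 : (ms.take 5).length = 5 := by rw [List.length_take]; omega
        have hrep : List.replicate (ms.length / 5 + 1) ((0:Int), (0:Int), (0:Int))
            = ((0:Int), (0:Int), (0:Int)) :: List.replicate ((ms.drop 5).length / 5 + 1) ((0:Int), (0:Int), (0:Int)) := by
          rw [List.length_drop]
          rw [show ms.length / 5 + 1 = ((ms.length - 5) / 5 + 1) + 1 from by omega]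
          rw [List.replicate_succ]
        rw [hrep, pvHeadBlock _ hbd]
        have hoff : (0 : Int) + ((ms.take 5).length : Int) = 5 := by rw [hlen5]; norm_num
        rw [hoff]
        have hbd2 : ∀ p ∈ PySem.List.enumerate (ms.drop 5) 5, 5 ≤ p.1 := by
          intro p hp
          exact (pvMemEnumFirst _ _ _ hp).1
        rw [pvShiftBlock _ hbd2]
        rw [pvEnumShift]
        rw [show (5 : Int) - 5 = 0 from by norm_num]
        rw [IH (ms.length - 5) (by omega) (ms.drop 5) (by rw [List.length_drop])]
        rw [pvChunksOf_cons ms hne]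
        simp only [List.cons_append]
        congr 1
        · rw [PySem.List.map_snd_enumerate]
          unfold pvChunkCounts
          rw [PySem.List.count_eq, PySem.List.count_eq, PySem.List.count_eq]
          simp
        · congr 1
          unfold pvPad
          rw [List.length_drop]
          rw [show (ms.length - 5) % 5 = ms.length % 5 from by omega]
      · -- a single chunk
        have htake : ms.take 5 = ms := List.take_of_length_le (by omega)
        have hdrop : ms.drop 5 = [] := by
          rw [List.drop_eq_nil_iff]
          omega
        rw [List.replicate_succ, pvHeadBlock _ hbd]
        rw [hdrop]
        rw [show PySem.List.enumerate ([] : List String) (0 + ((ms.take 5).length : Int)) = [] from by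
          simp [PySem.List.enumerate]]
        rw [List.foldl_nil]
        rw [pvChunksOf_cons ms hne, htake, hdrop]
        rw [show pvChunksOf ([] : List String) = [] from by decide]
        simp only [List.nil_append]
        congr 1
        · rw [PySem.List.map_snd_enumerate]
          unfold pvChunkCounts
          rw [PySem.List.count_eq, PySem.List.count_eq, PySem.List.count_eq]
          simp
        · unfold pvPad
          split_ifs with hm
          · rw [show ms.length / 5 = 1 from by omega]
            rfl
          · rw [show ms.length / 5 = 0 from by omega]
            rfl

theorem pvBuildA_eq (ms : List String) :
    (PySem.List.pyRange 0 (ms.length : Int) 1).foldl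
      (fun acc m =>
        let v := PySem.List.pyGetD ms m ""
        if v = "diamond" then acc.modify (PySem.Int.floordiv m 5).toNat (fun c => (c.1 + 1, c.2.1, c.2.2))
        else if v = "iron" then acc.modify (PySem.Int.floordiv m 5).toNat (fun c => (c.1, c.2.1 + 1, c.2.2))
        else if v = "stone" then acc.modify (PySem.Int.floordiv m 5).toNat (fun c => (c.1, c.2.1, c.2.2 + 1))
        else acc)
      (List.replicate (ms.length / 5 + 1) ((0 : Int), (0 : Int), (0 : Int)))
      = pvChunksOf ms ++ pvPad ms := by
  have h2 := pvEnumBuild ms.length ms rfl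
  rw [PySem.List.enumerate_eq_map_pyRange ms "", List.foldl_map] at h2
  simp only [PySem.List.len_eq] at h2
  exact h2

theorem pvSortedRevAppendMin {α : Type} (xs : List α) (key : α → Int) (z : α)
    (h : ∀ y ∈ xs, ¬ key y < key z) :
    PySem.List.sorted (xs ++ [z]) key true = PySem.List.sorted xs key true ++ [z] := by
  rw [PySem.List.sorted_rev_eq_foldl_insertBy, PySem.List.sorted_rev_eq_foldl_insertBy,
      List.foldl_append]
  simp only [List.foldl_cons, List.foldl_nil]
  rw [PySem.List.insertBy_of_forall_not_before]
  intro y hy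
  have hmem : y ∈ PySem.List.sorted xs key true := by
    rw [PySem.List.sorted_rev_eq_foldl_insertBy]
    exact hy
  rw [PySem.List.mem_sorted] at hmem
  simp [h y hmem]

theorem pvChunksNonneg (ms : List String) (c : Int × Int × Int) (h : c ∈ pvChunksOf ms) :
    ¬ c.1 * 36 + c.2.1 * 6 + c.2.2 < 0 := by
  unfold pvChunksOf at h
  rcases List.mem_map.mp h with ⟨s, _, rfl⟩
  unfold pvChunkCounts
  have h1 := Int.natCast_nonneg (PySem.List.count (PySem.List.slice ms (some s) (some (s + 5))) "diamond")
  have h2 := Int.natCast_nonneg (PySem.List.count (PySem.List.slice ms (some s) (some (s + 5))) "iron")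
  have h3 := Int.natCast_nonneg (PySem.List.count (PySem.List.slice ms (some s) (some (s + 5))) "stone")
  simp only
  omega

-- ---- B side: the streaming histogram equals the per-chunk signature counts ----

theorem pvBlockNoFlush (ps : List (Int × String))
    (h : ∀ p ∈ ps, PySem.Int.mod p.1 5 ≠ 4) :
    ∀ (d i s : Int) (hd : PySem.Dict (Int × Int × Int) Int),
    ps.foldl pvStepB (d, i, s, hd)
      = (d + (List.count "diamond" (ps.map Prod.snd) : Int),
         i + (List.count "iron" (ps.map Prod.snd) : Int),
         s + (List.count "stone" (ps.map Prod.snd) : Int), hd) := by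
  induction ps with
  | nil => intro d i s dct; simp
  | cons p ps ih =>
    intro d i s dct
    have hp := h p (List.mem_cons_self ..)
    have hp' : ¬ p.1 % 5 = 4 := by
      rwa [PySem.Int.mod_eq_emod_of_pos (by norm_num)] at hp
    have ih' := ih (fun q hq => h q (List.mem_cons_of_mem _ hq))
    simp only [List.foldl_cons]
    by_cases h1 : p.2 = "diamond"
    · have hstep : pvStepB (d, i, s, dct) p = (d + 1, i, s, dct) := by
        simp [pvStepB, h1, hp, hp']
      rw [hstep, ih']
      simp [List.count_cons, h1, Prod.ext_iff] <;> push_cast <;> omega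
    · by_cases h2 : p.2 = "iron"
      · have hstep : pvStepB (d, i, s, dct) p = (d, i + 1, s, dct) := by
          simp [pvStepB, h1, h2, hp, hp']
        rw [hstep, ih']
        simp [List.count_cons, h1, h2, Prod.ext_iff] <;> push_cast <;> omega
      · by_cases h3 : p.2 = "stone"
        · have hstep : pvStepB (d, i, s, dct) p = (d, i, s + 1, dct) := by
            simp [pvStepB, h1, h2, h3, hp, hp']
          rw [hstep, ih']
          simp [List.count_cons, h1, h2, h3, Prod.ext_iff] <;> push_cast <;> omega
        · have hstep : pvStepB (d, i, s, dct) p = (d, i, s, dct) := by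
            simp [pvStepB, h1, h2, h3, hp, hp']
          rw [hstep, ih']
          simp [List.count_cons, h1, h2, h3]

theorem pvModShift (k : Int) : PySem.Int.mod (k + 5) 5 = PySem.Int.mod k 5 := by
  rw [PySem.Int.mod_eq_emod_of_pos (by norm_num), PySem.Int.mod_eq_emod_of_pos (by norm_num)]
  omega

theorem pvFoldShift (xs : List String)
    (st : Int × Int × Int × PySem.Dict (Int × Int × Int) Int) :
    (PySem.List.enumerate xs 5).foldl pvStepB st = (PySem.List.enumerate xs 0).foldl pvStepB st := by
  have hm : (PySem.List.enumerate xs 0).map (fun p => (p.1 - (-5), p.2)) = PySem.List.enumerate xs 5 := by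
    rw [pvEnumShift]
    norm_num
  rw [← hm, List.foldl_map]
  have hf : ∀ (st : Int × Int × Int × PySem.Dict (Int × Int × Int) Int) (p : Int × String),
      pvStepB st (p.1 - (-5), p.2) = pvStepB st p := by
    intro st p
    simp only [pvStepB]
    rw [show (p.1 - (-5) : Int) = p.1 + 5 from by ring, pvModShift]
  simp only [hf]

theorem pvStreamBuild : ∀ (n : Nat) (ms : List String), ms.length = n →
    ∀ (hd : PySem.Dict (Int × Int × Int) Int) (sig : Int × Int × Int),
    (let st := (PySem.List.enumerate ms 0).foldl pvStepB (0, 0, 0, hd)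
     if PySem.Int.mod (ms.length : Int) 5 ≠ 0 then
       st.2.2.2.insert (st.1, st.2.1, st.2.2.1) (st.2.2.2.getD (st.1, st.2.1, st.2.2.1) 0 + 1)
     else st.2.2.2).getD sig 0
      = hd.getD sig 0 + (List.count sig (pvChunksOf ms) : Int) := by
  intro n
  induction n using Nat.strong_induction_on with
  | _ n IH =>
    intro ms hlen hd sig
    dsimp only
    rcases Nat.eq_zero_or_pos n with hn0 | hnpos
    · subst hn0
      have hne : ms = [] := List.eq_nil_of_length_eq_zero hlen
      subst hne
      rw [show PySem.List.enumerate ([] : List String) 0 = [] from by simp [PySem.List.enumerate]]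
      rw [List.foldl_nil]
      rw [if_neg (by decide)]
      rw [show pvChunksOf ([] : List String) = [] from by decide]
      simp
    · have hne : ms ≠ [] := by
        intro hcon
        subst hcon
        simp at hlen
        omega
      rcases Nat.lt_or_ge ms.length 5 with hlt5 | hge5
      · -- a single (partial) chunk, never flushed inside the loop
        have hb : ∀ p ∈ PySem.List.enumerate ms 0, PySem.Int.mod p.1 5 ≠ 4 := by
          intro p hp
          have hbd := pvMemEnumFirst ms 0 p hp
          rw [PySem.Int.mod_eq_emod_of_pos (by norm_num)]
          push_cast at hbd
          omega
        rw [pvBlockNoFlush _ hb 0 0 0 hd, PySem.List.map_snd_enumerate]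
        have hml : 0 < ms.length := List.length_pos_iff.mpr hne
        rw [if_pos (by
          rw [PySem.Int.mod_eq_emod_of_pos (by norm_num)]
          push_cast
          omega)]
        dsimp only
        have hch : pvChunksOf ms = [pvChunkCounts ms] := by
          rw [pvChunksOf_cons ms hne, List.take_of_length_le (by omega),
              show ms.drop 5 = [] from List.drop_eq_nil_iff.mpr (by omega),
              show pvChunksOf ([] : List String) = [] from by decide]
        have hcc : ((0 : Int) + (List.count "diamond" ms : Int), (0 : Int) + (List.count "iron" ms : Int),
            (0 : Int) + (List.count "stone" ms : Int)) = pvChunkCounts ms := by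
          unfold pvChunkCounts
          rw [PySem.List.count_eq, PySem.List.count_eq, PySem.List.count_eq]
          simp
        rw [hch, hcc, PySem.Dict.getD_insert]
        by_cases hsc : sig = pvChunkCounts ms
        · rw [if_pos hsc, hsc, List.count_singleton]
          simp
        · rw [if_neg hsc, List.count_singleton]
          rw [show (pvChunkCounts ms == sig) = false from beq_eq_false_iff_ne.mpr (Ne.symm hsc)]
          simp
      · -- a full first chunk (flushed at index 4), then the tail
        have ht5 : (ms.take 5).length = 5 := by rw [List.length_take]; omega
        have he : PySem.List.enumerate ms 0
            = PySem.List.enumerate (ms.take 5) 0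
              ++ PySem.List.enumerate (ms.drop 5) (0 + ((ms.take 5).length : Int)) := by
          conv_lhs => rw [← List.take_append_drop 5 ms]
          rw [PySem.List.enumerate_append]
        have h4 : ((ms.take 5).take 4).length = 4 := by rw [List.length_take, ht5]; decide
        obtain ⟨e, he1⟩ : ∃ e, (ms.take 5).drop 4 = [e] := by
          rw [← List.length_eq_one_iff, List.length_drop, ht5]
        have he5 : PySem.List.enumerate (ms.take 5) 0
            = PySem.List.enumerate ((ms.take 5).take 4) 0 ++ [((4 : Int), e)] := by
          conv_lhs => rw [← List.take_append_drop 4 (ms.take 5)]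
          rw [PySem.List.enumerate_append, he1, h4]
          norm_num
        have hb4 : ∀ p ∈ PySem.List.enumerate ((ms.take 5).take 4) 0, PySem.Int.mod p.1 5 ≠ 4 := by
          intro p hp
          have hbd := pvMemEnumFirst _ 0 p hp
          rw [h4] at hbd
          rw [PySem.Int.mod_eq_emod_of_pos (by norm_num)]
          push_cast at hbd
          omega
        have hsplit5 : (ms.take 5).take 4 ++ [e] = ms.take 5 := by
          rw [← he1, List.take_append_drop]
        have hcw : ∀ w : String,
            List.count w (ms.take 5) = List.count w ((ms.take 5).take 4) + List.count w [e] := by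
          intro w
          conv_lhs => rw [← hsplit5]
          rw [List.count_append]
        have hC : pvChunkCounts (ms.take 5)
            = ((List.count "diamond" (ms.take 5) : Int), (List.count "iron" (ms.take 5) : Int),
               (List.count "stone" (ms.take 5) : Int)) := by
          unfold pvChunkCounts
          rw [PySem.List.count_eq, PySem.List.count_eq, PySem.List.count_eq]
        have hstep : pvStepB
            ((0 : Int) + (List.count "diamond" ((ms.take 5).take 4) : Int),
             (0 : Int) + (List.count "iron" ((ms.take 5).take 4) : Int),
             (0 : Int) + (List.count "stone" ((ms.take 5).take 4) : Int), hd) ((4 : Int), e)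
            = ((0 : Int), (0 : Int), (0 : Int),
               hd.insert (pvChunkCounts (ms.take 5))
                 (hd.getD (pvChunkCounts (ms.take 5)) 0 + 1)) := by
          simp only [pvStepB]
          rw [if_pos (by decide : PySem.Int.mod (4 : Int) 5 = 4)]
          rw [hC, hcw "diamond", hcw "iron", hcw "stone"]
          by_cases h1 : e = "diamond"
          · subst h1
            simp [List.count_cons, Prod.ext_iff] <;> (push_cast; omega)
          · by_cases h2 : e = "iron"
            · subst h2
              simp [List.count_cons, Prod.ext_iff] <;> (push_cast; omega)
            · by_cases h3 : e = "stone"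
              · subst h3
                simp [List.count_cons, Prod.ext_iff] <;> (push_cast; omega)
              · simp [List.count_cons, h1, h2, h3, Prod.ext_iff,
                      show ("diamond" == e) = false from beq_eq_false_iff_ne.mpr (Ne.symm h1),
                      show ("iron" == e) = false from beq_eq_false_iff_ne.mpr (Ne.symm h2),
                      show ("stone" == e) = false from beq_eq_false_iff_ne.mpr (Ne.symm h3)] <;>
                  (push_cast; omega)
        rw [he, List.foldl_append, he5, List.foldl_append,
            pvBlockNoFlush _ hb4 0 0 0 hd, PySem.List.map_snd_enumerate,
            List.foldl_cons, List.foldl_nil, hstep, ht5,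
            show (0 : Int) + ((5 : Nat) : Int) = 5 from by norm_num, pvFoldShift]
        have hmodeq : PySem.Int.mod ((ms.length : Nat) : Int) 5
            = PySem.Int.mod (((ms.drop 5).length : Nat) : Int) 5 := by
          rw [List.length_drop]
          rw [show ((ms.length : Nat) : Int) = (((ms.length - 5 : Nat) : Nat) : Int) + 5 from by
            push_cast; omega]
          rw [pvModShift]
        rw [hmodeq]
        have hIH := IH (n - 5) (by omega) (ms.drop 5) (by rw [List.length_drop]; omega)
          (hd.insert (pvChunkCounts (ms.take 5)) (hd.getD (pvChunkCounts (ms.take 5)) 0 + 1)) sig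
        dsimp only at hIH
        rw [hIH, PySem.Dict.getD_insert, pvChunksOf_cons ms hne, List.count_cons]
        by_cases hsc : sig = pvChunkCounts (ms.take 5)
        · rw [if_pos hsc, hsc]
          simp only [beq_self_eq_true, if_true]
          push_cast
          ring
        · rw [if_neg hsc]
          rw [show (pvChunkCounts (ms.take 5) == sig) = false from
            beq_eq_false_iff_ne.mpr (Ne.symm hsc)]
          simp only [Bool.false_eq_true, if_false]
          push_cast
          ring

-- ---- B side: the batched descending-signature hand-out equals A's greedy pvPay ----

theorem pvPay_congr_pos (L : List (Int × Int × Int)) :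
    ∀ (a b c a' b' c' : Int), max a 0 = max a' 0 → max b 0 = max b' 0 → max c 0 = max c' 0 →
    pvPay a b c L = pvPay a' b' c' L := by
  induction L with
  | nil => intros; rfl
  | cons x t ih =>
    intro a b c a' b' c' h1 h2 h3
    by_cases ha : a > 0
    · rw [pvPay, pvPay, if_pos ha, if_pos (show a' > 0 from by omega),
          ih (a - 1) b c (a' - 1) b' c' (by omega) h2 h3]
    · rw [pvPay, pvPay, if_neg ha, if_neg (show ¬ a' > 0 from by omega)]
      by_cases hb : b > 0
      · rw [if_pos hb, if_pos (show b' > 0 from by omega),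
            ih a (b - 1) c a' (b' - 1) c' h1 (by omega) h3]
      · rw [if_neg hb, if_neg (show ¬ b' > 0 from by omega)]
        by_cases hc : c > 0
        · rw [if_pos hc, if_pos (show c' > 0 from by omega),
              ih a b (c - 1) a' b' (c' - 1) h1 h2 (by omega)]
        · rw [if_neg hc, if_neg (show ¬ c' > 0 from by omega)]

theorem pvSplitTop (g : Int × Int × Int) (rest : List (Int × Int × Int))
    (L : List (Int × Int × Int))
    (hP : L.Pairwise (fun a b => pvKey b ≤ pvKey a))
    (hmem : ∀ x ∈ L, x ∈ g :: rest)
    (hlt : ∀ x ∈ rest, pvKey x < pvKey g) :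
    L = List.replicate (L.count g) g ++ L.filter (fun x => x != g) := by
  induction L with
  | nil => simp
  | cons x xs ih =>
    rcases List.pairwise_cons.mp hP with ⟨hx, hP'⟩
    by_cases hxg : x = g
    · subst hxg
      have hrec := ih hP' (fun y hy => hmem y (List.mem_cons_of_mem _ hy))
      rw [List.count_cons_self, List.replicate_succ, List.cons_append, List.filter_cons]
      rw [show ((x != x) = false) from by simp]
      simp only [Bool.false_eq_true, if_false]
      exact congrArg (x :: ·) hrec
    · have hxr : x ∈ rest := by
        rcases List.mem_cons.mp (hmem x (List.mem_cons_self ..)) with h | h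
        · exact absurd h hxg
        · exact h
      have hkx : pvKey x < pvKey g := hlt x hxr
      have hall : ∀ y ∈ x :: xs, y ≠ g := by
        intro y hy
        rcases List.mem_cons.mp hy with rfl | hy'
        · exact hxg
        · have hk := hx y hy'
          intro hyg
          subst hyg
          omega
      rw [List.count_eq_zero.mpr (fun hmem' => hall g hmem' rfl), List.replicate_zero,
          List.nil_append, List.filter_eq_self.mpr (fun a ha => by simpa using hall a ha)]

theorem pvPayBatch : ∀ (n : Nat) (g : Int × Int × Int) (L' : List (Int × Int × Int))
    (c0 c1 c2 : Int), 0 ≤ c0 → 0 ≤ c1 → 0 ≤ c2 →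
    pvPay c0 c1 c2 (List.replicate n g ++ L')
      = (min (n : Int) c0) * pvW0 g
        + (min ((n : Int) - min (n : Int) c0) c1) * pvW1 g
        + (min ((n : Int) - min (n : Int) c0 - min ((n : Int) - min (n : Int) c0) c1) c2) * pvW2 g
        + pvPay (c0 - min (n : Int) c0) (c1 - min ((n : Int) - min (n : Int) c0) c1)
            (c2 - min ((n : Int) - min (n : Int) c0 - min ((n : Int) - min (n : Int) c0) c1) c2) L' := by
  intro n
  induction n with
  | zero =>
    intro g L' c0 c1 c2 h0 h1 h2
    rw [show ((0 : Nat) : Int) = 0 from rfl]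
    rw [show min (0 : Int) c0 = 0 from by omega]
    rw [show min ((0 : Int) - 0) c1 = 0 from by omega]
    rw [show min ((0 : Int) - 0 - 0) c2 = 0 from by omega]
    simp
  | succ n ih =>
    intro g L' c0 c1 c2 h0 h1 h2
    rw [List.replicate_succ, List.cons_append, pvPay]
    push_cast
    by_cases hc0 : c0 > 0
    · rw [if_pos hc0, ih g L' (c0 - 1) c1 c2 (by omega) h1 h2]
      rw [show min ((n : Int) + 1) c0 = min (n : Int) (c0 - 1) + 1 from by omega]
      rw [show (n : Int) + 1 - (min (n : Int) (c0 - 1) + 1) = (n : Int) - min (n : Int) (c0 - 1) from by ring]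
      rw [show c0 - (min (n : Int) (c0 - 1) + 1) = c0 - 1 - min (n : Int) (c0 - 1) from by ring]
      ring
    · rw [if_neg hc0]
      have hc0' : c0 = 0 := by omega
      subst hc0'
      by_cases hc1 : c1 > 0
      · rw [if_pos hc1, ih g L' 0 (c1 - 1) c2 (by omega) (by omega) h2]
        rw [show min ((n : Int)) 0 = 0 from by omega,
            show min ((n : Int) + 1) 0 = 0 from by omega]
        rw [show min ((n : Int) + 1 - 0) c1 = min ((n : Int) - 0) (c1 - 1) + 1 from by omega]
        rw [show (n : Int) + 1 - 0 - (min ((n : Int) - 0) (c1 - 1) + 1)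
              = (n : Int) - 0 - min ((n : Int) - 0) (c1 - 1) from by ring]
        rw [show c1 - (min ((n : Int) - 0) (c1 - 1) + 1)
              = c1 - 1 - min ((n : Int) - 0) (c1 - 1) from by ring]
        ring
      · rw [if_neg hc1]
        have hc1' : c1 = 0 := by omega
        subst hc1'
        by_cases hc2 : c2 > 0
        · rw [if_pos hc2, ih g L' 0 0 (c2 - 1) (by omega) (by omega) (by omega)]
          rw [show min ((n : Int)) 0 = 0 from by omega,
              show min ((n : Int) + 1) 0 = 0 from by omega]
          rw [show min ((n : Int) - 0) 0 = 0 from by omega,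
              show min ((n : Int) + 1 - 0) 0 = 0 from by omega]
          rw [show min ((n : Int) + 1 - 0 - 0) c2 = min ((n : Int) - 0 - 0) (c2 - 1) + 1 from by omega]
          rw [show c2 - (min ((n : Int) - 0 - 0) (c2 - 1) + 1)
                = c2 - 1 - min ((n : Int) - 0 - 0) (c2 - 1) from by ring]
          ring
        · rw [if_neg hc2]
          have hc2' : c2 = 0 := by omega
          subst hc2'
          rw [show min ((n : Int) + 1) 0 = 0 from by omega]
          rw [show min ((n : Int) + 1 - 0) 0 = 0 from by omega]
          rw [show min ((n : Int) + 1 - 0 - 0) 0 = 0 from by omega]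
          rw [pvPay_nonpos (0 - 0) (0 - 0) (0 - 0) (by omega) (by omega) (by omega) L']
          ring

theorem pvMain : ∀ (sigs : List (Int × Int × Int)),
    sigs.Pairwise (fun g g' => pvKey g' < pvKey g) →
    ∀ (L : List (Int × Int × Int)) (cnt : (Int × Int × Int) → Int) (ans c0 c1 c2 : Int),
    0 ≤ c0 → 0 ≤ c1 → 0 ≤ c2 →
    L.Pairwise (fun a b => pvKey b ≤ pvKey a) →
    (∀ x ∈ L, x ∈ sigs) →
    (∀ g ∈ sigs, cnt g = (L.count g : Int)) →
    (sigs.foldl (fun st g => pvBStep st (cnt g) g) (ans, c0, c1, c2)).1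
      = ans + pvPay c0 c1 c2 L := by
  intro sigs
  induction sigs with
  | nil =>
    intro _ L cnt ans c0 c1 c2 _ _ _ _ hmem _
    have hL : L = [] := List.eq_nil_iff_forall_not_mem.mpr (fun x hx => by simpa using hmem x hx)
    subst hL
    simp [pvPay]
  | cons g rest ih =>
    intro hsig L cnt ans c0 c1 c2 h0 h1 h2 hP hmem hcnt
    rcases List.pairwise_cons.mp hsig with ⟨hgr, hsig'⟩
    have hn : cnt g = (L.count g : Int) := hcnt g (List.mem_cons_self ..)
    -- decompose L into the copies of the top signature g and the strictly smaller rest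
    have hLsplit := pvSplitTop g rest L hP hmem hgr
    set L' := L.filter (fun x => x != g) with hL'
    have hP' : L'.Pairwise (fun a b => pvKey b ≤ pvKey a) := hP.filter _
    have hmem' : ∀ x ∈ L', x ∈ rest := by
      intro x hx
      rcases List.mem_filter.mp hx with ⟨hxL, hxne⟩
      rcases List.mem_cons.mp (hmem x hxL) with rfl | hxr
      · simp at hxne
      · exact hxr
    have hcnt' : ∀ g' ∈ rest, cnt g' = (L'.count g' : Int) := by
      intro g' hg'
      have hne : g' ≠ g := by
        have := hgr g' hg'
        intro hgg
        subst hgg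
        omega
      rw [hcnt g' (List.mem_cons_of_mem _ hg'), hL',
          List.count_filter (by simpa using hne)]
    simp only [List.foldl_cons]
    rw [show pvBStep (ans, c0, c1, c2) (cnt g) g
          = (ans + ((min (cnt g) c0 + 5 * min (cnt g - min (cnt g) c0) c1
                + 25 * min (cnt g - min (cnt g) c0 - min (cnt g - min (cnt g) c0) c1) c2) * g.1
              + (min (cnt g) c0 + min (cnt g - min (cnt g) c0) c1
                + 5 * min (cnt g - min (cnt g) c0 - min (cnt g - min (cnt g) c0) c1) c2) * g.2.1
              + (min (cnt g) c0 + min (cnt g - min (cnt g) c0) c1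
                + min (cnt g - min (cnt g) c0 - min (cnt g - min (cnt g) c0) c1) c2) * g.2.2),
             c0 - min (cnt g) c0, c1 - min (cnt g - min (cnt g) c0) c1,
             c2 - min (cnt g - min (cnt g) c0 - min (cnt g - min (cnt g) c0) c1) c2)
        from by simp only [pvBStep]]
    have hcn : (0 : Int) ≤ (L.count g : Int) := by positivity
    rw [hn]
    rw [ih hsig' L' cnt _ _ _ _ (by omega) (by omega) (by omega) hP' hmem' hcnt']
    conv_rhs => rw [hLsplit]
    rw [pvPayBatch (L.count g) g L' c0 c1 c2 h0 h1 h2]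
    unfold pvW0 pvW1 pvW2
    ring

-- ---- B side: every chunk signature lies in pvDescSigs, which is strictly key-descending ----

theorem pvSigsSorted : pvDescSigs.Pairwise (fun g g' => pvKey g' < pvKey g) := by
  unfold pvDescSigs pvKey
  decide

theorem pvSigMem (a b c : Int) (ha : 0 ≤ a) (hb : 0 ≤ b) (hc : 0 ≤ c) (h : a + b + c ≤ 5) :
    (a, b, c) ∈ pvDescSigs := by
  have ha5 : a ≤ 5 := by omega
  have hb5 : b ≤ 5 := by omega
  have hc5 : c ≤ 5 := by omega
  unfold pvDescSigs
  interval_cases a <;> interval_cases b <;> interval_cases c <;> first | decide | omega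

theorem pvCountSum3 (l : List String) :
    List.count "diamond" l + List.count "iron" l + List.count "stone" l ≤ l.length := by
  induction l with
  | nil => simp
  | cons x t ih =>
    simp only [List.count_cons, List.length_cons]
    split_ifs with h1 h2 h3 <;> first | omega | (exfalso; simp_all)

theorem pvChunkMem (ms : List String) (x : Int × Int × Int) (h : x ∈ pvChunksOf ms) :
    x ∈ pvDescSigs := by
  unfold pvChunksOf at h
  rcases List.mem_map.mp h with ⟨s, hs, rfl⟩
  have hs0 : 0 ≤ s := ((PySem.List.mem_pyRange_iff_of_pos (by norm_num) s).mp hs).1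
  have hlen : (PySem.List.slice ms (some s) (some (s + 5))).length ≤ 5 := by
    rw [PySem.List.slice_toNat _ hs0 (by omega)]
    calc (List.take ((s + 5).toNat - s.toNat) (List.drop s.toNat ms)).length
        ≤ (s + 5).toNat - s.toNat := List.length_take_le _ _
      _ ≤ 5 := by omega
  have hsum := pvCountSum3 (PySem.List.slice ms (some s) (some (s + 5)))
  unfold pvChunkCounts
  rw [PySem.List.count_eq, PySem.List.count_eq, PySem.List.count_eq]
  exact pvSigMem _ _ _ (by positivity) (by positivity) (by positivity) (by push_cast; omega)

-- ---- assembly helpers ----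

theorem pvNestEq (h : PySem.Dict (Int × Int × Int) Int) (st : Int × Int × Int × Int) :
    (PySem.List.pyRange 5 (-1) (-1)).foldl
      (fun st dd =>
        (PySem.List.pyRange (5 - dd) (-1) (-1)).foldl
          (fun st ii =>
            (PySem.List.pyRange (5 - dd - ii) (-1) (-1)).foldl
              (fun st ss => pvBStep st (h.getD (dd, ii, ss) 0) (dd, ii, ss)) st) st) st
      = pvDescSigs.foldl (fun st g => pvBStep st (h.getD g 0) g) st := by
  have r5 : PySem.List.pyRange 5 (-1) (-1) = [5, 4, 3, 2, 1, 0] := by decide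
  have r4 : PySem.List.pyRange 4 (-1) (-1) = [4, 3, 2, 1, 0] := by decide
  have r3 : PySem.List.pyRange 3 (-1) (-1) = [3, 2, 1, 0] := by decide
  have r2 : PySem.List.pyRange 2 (-1) (-1) = [2, 1, 0] := by decide
  have r1 : PySem.List.pyRange 1 (-1) (-1) = [1, 0] := by decide
  have r0 : PySem.List.pyRange 0 (-1) (-1) = [0] := by decide
  simp only [pvDescSigs, r5, List.foldl_cons, List.foldl_nil]
  norm_num [r5, r4, r3, r2, r1, r0, List.foldl_cons, List.foldl_nil]

theorem pvCaps (picks : List Int) :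
    PySem.List.pyGetD (PySem.List.slice (picks ++ [0, 0, 0]) none (some 3)) 0 0 = picks.getD 0 0
    ∧ PySem.List.pyGetD (PySem.List.slice (picks ++ [0, 0, 0]) none (some 3)) 1 0 = picks.getD 1 0
    ∧ PySem.List.pyGetD (PySem.List.slice (picks ++ [0, 0, 0]) none (some 3)) 2 0 = picks.getD 2 0 := by
  rw [PySem.List.slice_to _ (by norm_num : (0:Int) ≤ 3)]
  match picks with
  | [] => refine ⟨?_, ?_, ?_⟩ <;> simp [PySem.List.pyGetD_ofNat', List.getD]
  | [a] => refine ⟨?_, ?_, ?_⟩ <;> simp [PySem.List.pyGetD_ofNat', List.getD]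
  | [a, b] => refine ⟨?_, ?_, ?_⟩ <;> simp [PySem.List.pyGetD_ofNat', List.getD]
  | a :: b :: c :: rest => refine ⟨?_, ?_, ?_⟩ <;> simp [PySem.List.pyGetD_ofNat', List.getD]

-- ===== VERDICT (by name: the statement is the Claim_ definition above) =====
theorem solution_spec : Claim_equal_solution := by
  intro picks minerals _
  unfold Spec_solution solution solution_alt
  dsimp only
  rw [pvTrunc]
  set ms := PySem.List.slice minerals none (some (picks.sum * 5)) with hms
  rw [pvBuildA_eq]
  -- B's streaming pass, rewritten as a fold over enumerate
  have hb : (PySem.List.pyRange 0 ((ms.length : Nat) : Int) 1).foldl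
      (fun st k => pvStepB st (k, PySem.List.pyGetD ms k ""))
      ((0 : Int), (0 : Int), (0 : Int), (PySem.Dict.empty : PySem.Dict (Int × Int × Int) Int))
      = (PySem.List.enumerate ms 0).foldl pvStepB
          ((0 : Int), (0 : Int), (0 : Int), PySem.Dict.empty) := by
    rw [PySem.List.enumerate_eq_map_pyRange ms "", List.foldl_map]
    simp only [PySem.List.len_eq]
  rw [hb, pvNestEq]
  obtain ⟨hc0, hc1, hc2⟩ := pvCaps picks
  rw [hc0, hc1, hc2]
  -- the histogram holds exactly the per-signature chunk counts
  have hstream := pvStreamBuild ms.length ms rfl PySem.Dict.empty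
  dsimp only at hstream
  simp only [PySem.Dict.getD_empty, zero_add] at hstream
  -- abbreviations
  set S := PySem.List.sorted (pvChunksOf ms) (fun c => c.1 * 36 + c.2.1 * 6 + c.2.2) true with hS
  have hSP : S.Pairwise (fun a b => pvKey b ≤ pvKey a) :=
    PySem.List.sorted_pairwise_rev (pvChunksOf ms) (fun c => c.1 * 36 + c.2.1 * 6 + c.2.2)
  have hSmem : ∀ x ∈ S, x ∈ pvDescSigs := by
    intro x hx
    exact pvChunkMem ms x ((PySem.List.mem_sorted _ _ _ x).mp hx)
  have hScnt : ∀ g ∈ pvDescSigs,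
      (if PySem.Int.mod ((ms.length : Nat) : Int) 5 ≠ 0 then
        (((PySem.List.enumerate ms 0).foldl pvStepB
            ((0 : Int), (0 : Int), (0 : Int), PySem.Dict.empty))).2.2.2.insert
          (((PySem.List.enumerate ms 0).foldl pvStepB
            ((0 : Int), (0 : Int), (0 : Int), PySem.Dict.empty)).1,
           ((PySem.List.enumerate ms 0).foldl pvStepB
            ((0 : Int), (0 : Int), (0 : Int), PySem.Dict.empty)).2.1,
           ((PySem.List.enumerate ms 0).foldl pvStepB
            ((0 : Int), (0 : Int), (0 : Int), PySem.Dict.empty)).2.2.1)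
          ((((PySem.List.enumerate ms 0).foldl pvStepB
            ((0 : Int), (0 : Int), (0 : Int), PySem.Dict.empty))).2.2.2.getD
            (((PySem.List.enumerate ms 0).foldl pvStepB
              ((0 : Int), (0 : Int), (0 : Int), PySem.Dict.empty)).1,
             ((PySem.List.enumerate ms 0).foldl pvStepB
              ((0 : Int), (0 : Int), (0 : Int), PySem.Dict.empty)).2.1,
             ((PySem.List.enumerate ms 0).foldl pvStepB
              ((0 : Int), (0 : Int), (0 : Int), PySem.Dict.empty)).2.2.1) 0 + 1)
      else ((PySem.List.enumerate ms 0).foldl pvStepB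
            ((0 : Int), (0 : Int), (0 : Int), PySem.Dict.empty)).2.2.2).getD g 0
      = (S.count g : Int) := by
    intro g _
    rw [hstream g]
    congr 1
    exact ((PySem.List.sorted_perm (pvChunksOf ms)
      (fun c => c.1 * 36 + c.2.1 * 6 + c.2.2) true).count_eq g).symm
  -- B's descending enumeration pays exactly pvPay of the sorted chunk list
  have hB := pvMain pvDescSigs pvSigsSorted S _ 0
    (max (picks.getD 0 0) 0) (max (picks.getD 1 0) 0) (max (picks.getD 2 0) 0)
    (le_max_right _ _) (le_max_right _ _) (le_max_right _ _) hSP hSmem hScnt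
  rw [hB, zero_add]
  -- A's greedy loop pays pvPay of the sorted chunk list (the padding chunk pays nothing)
  by_cases hpad : ms.length % 5 = 0
  · rw [show pvPad ms = [((0 : Int), (0 : Int), (0 : Int))] from by unfold pvPad; rw [if_pos hpad]]
    rw [pvSortedRevAppendMin _ _ _ (by
      intro y hy
      have := pvChunksNonneg _ y hy
      simpa using this)]
    rw [pvFoldA_spec, pvPay_append_zero, zero_add]
    exact pvPay_congr_pos S _ _ _ _ _ _ (by omega) (by omega) (by omega)
  · rw [show pvPad ms = [] from by unfold pvPad; rw [if_neg hpad], List.append_nil]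
    rw [pvFoldA_spec, zero_add]
    exact pvPay_congr_pos S _ _ _ _ _ _ (by omega) (by omega) (by omega)
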